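-- pv_equiv track=rewrite | github.com/morbidsteve/keystone | backend/app/ingestion/tak_parser.py | classify_cot_type
-- ===== SOURCE A (Python) =====
-- _COT_CATEGORY_MAP = {
--     "a-f-G": "FRIENDLY_GROUND",
--     "a-f-A": "FRIENDLY_AIR",
--     "a-f-S": "FRIENDLY_SEA",
--     "a-h-G": "HOSTILE_GROUND",
--     "a-n-G": "NEUTRAL_GROUND",
--     "a-u-G": "UNKNOWN_GROUND",
--     "b-r": "ROUTE",
--     "b-m-p-s-p-loc": "SUPPLY_POINT",
--     "b-m-p-s-p-loc-e": "EQUIPMENT_CACHE",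
--     "b-m-p-w": "WAYPOINT",
--     "b-m-p-c": "CHECKPOINT",
-- }
--
-- def classify_cot_type(cot_type: str) -> str:
--     """Classify a CoT type code into a KEYSTONE data category.
--
--     CoT type taxonomy uses a dotted hierarchy:
--     a-f-G-U-C-I = atom-affiliation-dimension-entity-type-subtype
--
--     Affiliation: f=friendly, h=hostile, n=neutral, u=unknown
--     Dimension: G=ground, A=air, S=sea/surface
--
--     Args:
--         cot_type: CoT type string (e.g., "a-f-G-U-C-I").
--
--     Returns:
--         KEYSTONE category string (e.g., "FRIENDLY_GROUND").
--     """
--     if not cot_type: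
--         return "UNKNOWN"
--
--     # Try longest prefix match first
--     for prefix in sorted(_COT_CATEGORY_MAP.keys(), key=len, reverse=True):
--         if cot_type.startswith(prefix):
--             return _COT_CATEGORY_MAP[prefix]
--
--     # Fallback categorizations based on first characters
--     if cot_type.startswith("a-"):
--         return "UNIT"
--     if cot_type.startswith("b-"):
--         return "TACTICAL_GRAPHIC"
--
--     return "UNKNOWN"
-- ===== SOURCE B (Python) =====
-- _COT_CATEGORY_MAP = {
--     "a-f-G": "FRIENDLY_GROUND",
--     "a-f-A": "FRIENDLY_AIR",
--     "a-f-S": "FRIENDLY_SEA",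
--     "a-h-G": "HOSTILE_GROUND",
--     "a-n-G": "NEUTRAL_GROUND",
--     "a-u-G": "UNKNOWN_GROUND",
--     "b-r": "ROUTE",
--     "b-m-p-s-p-loc": "SUPPLY_POINT",
--     "b-m-p-s-p-loc-e": "EQUIPMENT_CACHE",
--     "b-m-p-w": "WAYPOINT",
--     "b-m-p-c": "CHECKPOINT",
-- }
--
-- _MAX_PREFIX_LEN = max(map(len, _COT_CATEGORY_MAP))
--
--
-- def classify_cot_type(cot_type: str) -> str:
--     """Classify a CoT type code into a KEYSTONE data category.
--
--     Longest-prefix match done by slicing the input from its full length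
--     down to 1 (capped at the longest key length) and probing the category map, instead of scanning a sorted
--     key list with startswith.
--     """
--     for i in range(min(len(cot_type), _MAX_PREFIX_LEN), 0, -1):
--         category = _COT_CATEGORY_MAP.get(cot_type[:i])
--         if category is not None:
--             return category
--
--     if cot_type.startswith("a-"):
--         return "UNIT"
--     if cot_type.startswith("b-"):
--         return "TACTICAL_GRAPHIC"
--
--     return "UNKNOWN"
-- ===== Notes on version B (the rewrite author's own statement) =====
-- stated objective: alternative
-- what changed: B replaces A's scan over the length-sorted key list with startswith tests by slicing the input itself from min(len(input), longest key length) down to 1 and probing the category dict for each prefix, returning on the first (hence longest) hit; the empty-string guard disappears because the loop and fallbacks already yield UNKNOWN.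
import Mathlib
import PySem

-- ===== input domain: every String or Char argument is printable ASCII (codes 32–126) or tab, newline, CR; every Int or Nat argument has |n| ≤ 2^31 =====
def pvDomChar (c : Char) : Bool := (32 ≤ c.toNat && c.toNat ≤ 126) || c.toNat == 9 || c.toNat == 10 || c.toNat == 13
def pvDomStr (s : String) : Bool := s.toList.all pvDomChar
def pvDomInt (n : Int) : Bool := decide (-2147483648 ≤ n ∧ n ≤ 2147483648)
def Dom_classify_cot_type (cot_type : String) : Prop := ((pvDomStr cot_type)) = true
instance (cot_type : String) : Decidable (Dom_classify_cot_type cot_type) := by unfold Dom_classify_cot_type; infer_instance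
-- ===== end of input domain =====

-- B replaces A's startswith scan over the length-sorted key list by probing the
-- category dict with prefixes of the input from its full length down to 1 (objective: alternative).

-- the module constant _COT_CATEGORY_MAP (shared by both Pythons); keys as List Char
def cotMap : PySem.Dict (List Char) String := PySem.Dict.mk
  [("a-f-G".toList, "FRIENDLY_GROUND"),
   ("a-f-A".toList, "FRIENDLY_AIR"),
   ("a-f-S".toList, "FRIENDLY_SEA"),
   ("a-h-G".toList, "HOSTILE_GROUND"),
   ("a-n-G".toList, "NEUTRAL_GROUND"),
   ("a-u-G".toList, "UNKNOWN_GROUND"),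
   ("b-r".toList, "ROUTE"),
   ("b-m-p-s-p-loc".toList, "SUPPLY_POINT"),
   ("b-m-p-s-p-loc-e".toList, "EQUIPMENT_CACHE"),
   ("b-m-p-w".toList, "WAYPOINT"),
   ("b-m-p-c".toList, "CHECKPOINT")]

-- ===== PORT A =====
-- A's body after the empty guard: the for-loop over the length-sorted keys
-- (first startswith hit, early return) and the two fallback guards
def aChain (s : List Char) : String :=
  match (PySem.List.sorted cotMap.keys (fun k => k.length) true).find?
      (fun p => PySem.Chars.startswith s p) with
  | some p => cotMap.getD p "UNKNOWN"   -- _COT_CATEGORY_MAP[prefix]; the key is always present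
  | none =>
    if PySem.Chars.startswith s "a-".toList then "UNIT"
    else if PySem.Chars.startswith s "b-".toList then "TACTICAL_GRAPHIC"
    else "UNKNOWN"

def classify_cot_type (cot_type : String) : String :=
  if cot_type.toList = [] then "UNKNOWN"   -- if not cot_type
  else aChain cot_type.toList

-- ===== PORT B =====
-- _MAX_PREFIX_LEN = max(map(len, _COT_CATEGORY_MAP)); the map is a nonempty literal, so max? is some
def maxPrefixLen : Nat := (PySem.List.max? (cotMap.keys.map (fun k => k.length)) (fun x => x)).getD 0

-- B's loop: for i in range(min(len(cot_type), _MAX_PREFIX_LEN), 0, -1): probe _COT_CATEGORY_MAP.get(cot_type[:i]);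
-- the argument (i+1) below is B's loop variable i, counting down
def altProbe (s : List Char) : Nat → String
  | 0 =>
    if PySem.Chars.startswith s "a-".toList then "UNIT"
    else if PySem.Chars.startswith s "b-".toList then "TACTICAL_GRAPHIC"
    else "UNKNOWN"
  | (i+1) =>
    match cotMap.get? (PySem.List.slice s none (some ((i+1 : Nat) : Int))) with
    | some category => category
    | none => altProbe s i

def classify_cot_type_alt (cot_type : String) : String :=
  altProbe cot_type.toList (min cot_type.toList.length maxPrefixLen)

-- ===== PRECONDITION & SPEC =====
def Spec_classify_cot_type (cot_type : String) (out : String) : Prop := out = classify_cot_type_alt cot_type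
instance (cot_type : String) (out : String) : Decidable (Spec_classify_cot_type cot_type out) := by unfold Spec_classify_cot_type; infer_instance

-- ===== CLAIM (what is proved, stated in full; the proofs are below) =====
def Claim_equal_classify_cot_type : Prop := ∀ (cot_type : String), Dom_classify_cot_type cot_type → Spec_classify_cot_type cot_type (classify_cot_type cot_type)

-- ===== LEMMAS AND PROOFS =====

-- every key of the map is nonempty
lemma cotKeys_pos : ∀ p ∈ cotMap.keys, 0 < p.length := by decide

lemma cotKeys_nodup : cotMap.keys.Nodup := by decide

-- no key is longer than the cap B's loop starts from
lemma cotKeys_le_maxPrefixLen : ∀ p ∈ cotMap.keys, p.length ≤ maxPrefixLen := by decide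

-- in a list ordered by nonincreasing length, find? startswith hits the unique
-- longest key that is a prefix of s
lemma find?_startswith_eq_some (s k : List Char) (L : List (List Char))
    (hord : L.Pairwise (fun a b => b.length ≤ a.length))
    (hk : k ∈ L) (hpre : k <+: s)
    (hmax : ∀ p ∈ L, p <+: s → p.length ≤ k.length) :
    L.find? (fun p => PySem.Chars.startswith s p) = some k := by
  induction L with
  | nil => cases hk
  | cons a t ih =>
    by_cases hak : a = k
    · subst hak
      rw [List.find?_cons, (PySem.Chars.startswith_iff _ _).mpr hpre]
    · have hkt : k ∈ t := by
        rcases List.mem_cons.mp hk with h | h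
        · exact absurd h.symm hak
        · exact h
      have hfalse : PySem.Chars.startswith s a = false := by
        rw [Bool.eq_false_iff]
        intro hT
        have ha : a <+: s := (PySem.Chars.startswith_iff _ _).mp hT
        have h1 : a.length ≤ k.length := hmax a List.mem_cons_self ha
        have h2 : k.length ≤ a.length := (List.pairwise_cons.mp hord).1 k hkt
        rcases List.prefix_or_prefix_of_prefix ha hpre with hp | hp
        · exact hak (hp.eq_of_length (le_antisymm h1 h2))
        · exact hak (hp.eq_of_length (le_antisymm h2 h1)).symm
      rw [List.find?_cons, hfalse]
      exact ih (List.pairwise_cons.mp hord).2 hkt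
        (fun p hp hps => hmax p (List.mem_cons_of_mem _ hp) hps)

-- the main loop invariant: while no prefix key longer than i exists,
-- B's countdown loop from i computes A's chain
lemma altProbe_eq (s : List Char) :
    ∀ i, i ≤ s.length →
    (∀ p ∈ cotMap.keys, p <+: s → p.length ≤ i) →
    altProbe s i = aChain s := by
  intro i
  induction i with
  | zero =>
    intro _ h0
    have hnone : (PySem.List.sorted cotMap.keys (fun k => k.length) true).find?
        (fun p => PySem.Chars.startswith s p) = none := by
      rw [List.find?_eq_none]
      intro x hx hT
      have hxk : x ∈ cotMap.keys := (PySem.List.mem_sorted _ _ _ _).mp hx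
      have := h0 x hxk ((PySem.Chars.startswith_iff _ _).mp hT)
      have := cotKeys_pos x hxk
      omega
    simp [altProbe, aChain, hnone]
  | succ i ih =>
    intro hlen h
    have hslice : PySem.List.slice s none (some ((i : Int)+1)) = s.take (i+1) := by
      have h' := PySem.List.slice_to_natCast s (i+1)
      push_cast at h'
      exact h'
    cases hlook : cotMap.get? (s.take (i+1)) with
    | some v =>
      have hmem : (s.take (i+1), v) ∈ cotMap.items :=
        PySem.Dict.mem_items_of_get?_eq_some _ hlook
      have hkmem : s.take (i+1) ∈ cotMap.keys := PySem.Dict.mem_keys_of_mem_items _ hmem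
      have hklen : (s.take (i+1)).length = i + 1 := by
        rw [List.length_take]; omega
      have hfind : (PySem.List.sorted cotMap.keys (fun k => k.length) true).find?
          (fun p => PySem.Chars.startswith s p) = some (s.take (i+1)) := by
        apply find?_startswith_eq_some s _ _ (PySem.List.sorted_pairwise_rev _ _)
        · exact (PySem.List.mem_sorted _ _ _ _).mpr hkmem
        · exact List.take_prefix _ _
        · intro p hp hps
          rw [hklen]
          exact h p ((PySem.List.mem_sorted _ _ _ _).mp hp) hps
      have hgetD : cotMap.getD (s.take (i+1)) "UNKNOWN" = v :=
        PySem.Dict.getD_of_mem_items _ hmem cotKeys_nodup _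
      simp [altProbe, aChain, hslice, hlook, hfind, hgetD]
    | none =>
      have hstep : altProbe s (i+1) = altProbe s i := by
        simp [altProbe, hslice, hlook]
      rw [hstep]
      apply ih (by omega)
      intro p hp hps
      have hple := h p hp hps
      rcases Nat.lt_or_ge p.length (i+1) with hlt | hge
      · omega
      · exfalso
        have hlenp : p.length = i + 1 := by omega
        have hptake : p = s.take (i+1) := by
          rw [← hlenp]
          exact List.prefix_iff_eq_take.mp hps
        rw [← hptake] at hlook
        exact ((PySem.Dict.get?_eq_none_iff_not_mem_keys _ _).mp hlook) hp

-- ===== VERDICT (by name: the statement is the Claim_ definition above) =====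
theorem classify_cot_type_spec : Claim_equal_classify_cot_type := by
  intro cot_type _
  unfold Spec_classify_cot_type classify_cot_type classify_cot_type_alt
  by_cases hnil : cot_type.toList = []
  · rw [if_pos hnil, hnil]
    decide
  · rw [if_neg hnil]
    exact (altProbe_eq cot_type.toList (min cot_type.toList.length maxPrefixLen)
      (Nat.min_le_left _ _)
      (fun p hp hps => le_min hps.length_le (cotKeys_le_maxPrefixLen p hp))).symm
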